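-- pv_equiv track=rewrite | github.com/cassiopka/crypto | cipher_app/ciphers/polybius_square_cipher.py | polybius_square_decipher
-- ===== SOURCE A (Python) =====
-- def polybius_square_decipher(text: str) -> str:
--     """Расшифровка квадрат Полибия."""
--     polybius_table = {
--         '11': 'а', '12': 'б', '13': 'в', '14': 'г', '15': 'д', '16': 'е',
--         '21': 'ж', '22': 'з', '23': 'и', '24': 'й', '25': 'к', '26': 'л',
--         '31': 'м', '32': 'н', '33': 'о', '34': 'п', '35': 'р', '36': 'с',
--         '41': 'т', '42': 'у', '43': 'ф', '44': 'х', '45': 'ц', '46': 'ч',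
--         '51': 'ш', '52': 'щ', '53': 'ъ', '54': 'ы', '55': 'ь', '56': 'э',
--         '61': 'ю', '62': 'я'
--     }
--
--     pairs = [text[i:i+2] for i in range(0, len(text), 2)]
--
--     decrypted_text = ''.join(polybius_table.get(pair, pair) for pair in pairs)
--     return decrypted_text
-- ===== SOURCE B (Python) =====
-- def _decode(a, b):
--     if '1' <= a <= '6' and '1' <= b <= '6':
--         idx = (ord(a) - 49) * 6 + (ord(b) - 49)
--         if idx < 32:
--             return chr(0x430 + idx)
--     return a + b
--
--
-- def polybius_square_decipher(text: str) -> str: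
--     """Polybius-square decipher with no stored table: the text is consumed
--     as a stack popped from the end, each letter is reconstructed by Unicode
--     code-point arithmetic, and the output is built back-to-front."""
--     stack = list(text)
--     trailer = [stack.pop()] if len(stack) % 2 else []
--     out = []
--     while stack:
--         b = stack.pop()
--         a = stack.pop()
--         out.append(_decode(a, b))
--     out.reverse()
--     return ''.join(out + trailer)
-- ===== Notes on version B (the rewrite author's own statement) =====
-- stated objective: alternative
-- what changed: B stores no lookup table or alphabet constant at all: it consumes the text as a stack popped from the end, reconstructs each letter by Unicode code-point arithmetic (chr(0x430 + (row-1)*6 + (col-1))), and builds the output back-to-front, reversing once at the end, instead of A's per-call dict plus a front-to-back pair-slice comprehension.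
import Mathlib
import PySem

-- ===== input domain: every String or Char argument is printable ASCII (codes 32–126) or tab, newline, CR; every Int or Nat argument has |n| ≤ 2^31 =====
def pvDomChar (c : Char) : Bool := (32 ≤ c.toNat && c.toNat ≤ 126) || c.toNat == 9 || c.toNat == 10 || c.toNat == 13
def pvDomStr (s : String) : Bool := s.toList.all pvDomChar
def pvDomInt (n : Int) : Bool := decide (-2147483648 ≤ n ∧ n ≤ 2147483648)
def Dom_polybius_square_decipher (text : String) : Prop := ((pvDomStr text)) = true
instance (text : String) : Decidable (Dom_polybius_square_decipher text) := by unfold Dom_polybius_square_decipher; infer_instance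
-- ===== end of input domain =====

-- B keeps no lookup table or alphabet constant: it pops the text from the end as a
-- stack, reconstructs letters by code-point arithmetic and builds the output
-- back-to-front (objective: alternative).

-- ===== PORT A =====
def pvPolybiusTable : PySem.Dict String String :=
  PySem.Dict.mk [("11","а"),("12","б"),("13","в"),("14","г"),("15","д"),("16","е"),
    ("21","ж"),("22","з"),("23","и"),("24","й"),("25","к"),("26","л"),
    ("31","м"),("32","н"),("33","о"),("34","п"),("35","р"),("36","с"),
    ("41","т"),("42","у"),("43","ф"),("44","х"),("45","ц"),("46","ч"),
    ("51","ш"),("52","щ"),("53","ъ"),("54","ы"),("55","ь"),("56","э"),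
    ("61","ю"),("62","я")]

def polybius_square_decipher (text : String) : String :=
  let pairs : List (List Char) :=
    (PySem.List.pyRange 0 (PySem.List.len text.toList) 2).map
      (fun i => PySem.List.slice text.toList (some i) (some (i + 2)))
  PySem.Str.join "" (pairs.map (fun p =>
    pvPolybiusTable.getD (String.ofList p) (String.ofList p)))

-- ===== PORT B =====
def pvDecodePair (a b : Char) : List Char :=
  if '1' ≤ a ∧ a ≤ '6' ∧ '1' ≤ b ∧ b ≤ '6' then
    let idx := (a.toNat - 49) * 6 + (b.toNat - 49)
    if idx < 32 then [Char.ofNat (0x430 + idx)] else [a, b]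
  else [a, b]

-- the 'while stack: b = pop(); a = pop()' loop; the stack is the reversed text
def pvGo : List Char → List (List Char) → List (List Char)
  | b :: a :: rest, out => pvGo rest (out ++ [pvDecodePair a b])
  | _, out => out

def polybius_square_decipher_alt (text : String) : String :=
  let stack := text.toList.reverse
  let st := if stack.length % 2 == 1 then (stack.tail, stack.take 1)
            else (stack, ([] : List Char))
  let out := pvGo st.1 []
  String.ofList (out.reverse.flatten ++ st.2)

-- ===== PRECONDITION & SPEC =====
def Spec_polybius_square_decipher (text : String) (out : String) : Prop := out = polybius_square_decipher_alt text
instance (text : String) (out : String) : Decidable (Spec_polybius_square_decipher text out) := by unfold Spec_polybius_square_decipher; infer_instance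

-- ===== CLAIM (what is proved, stated in full; the proofs are below) =====
def Claim_equal_polybius_square_decipher : Prop := ∀ (text : String), Dom_polybius_square_decipher text → Spec_polybius_square_decipher text (polybius_square_decipher text)

-- ===== LEMMAS AND PROOFS =====

-- the pair chunks A's slice comprehension produces, as a structural recursion
def pvChunks : List Char → List (List Char)
  | a :: b :: rest => [a, b] :: pvChunks rest
  | [] => []
  | [a] => [[a]]

-- what A's table lookup returns on a chunk
def pvDec : List Char → List Char
  | [a, b] => pvDecodePair a b
  | p => p

-- decoded pairs read off the reversed stack
def pvRevDecode : List Char → List (List Char)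
  | b :: a :: rest => pvDecodePair a b :: pvRevDecode rest
  | _ => []

theorem pv_char_range (a : Char) (h1 : '1' ≤ a) (h2 : a ≤ '6') :
    a = '1' ∨ a = '2' ∨ a = '3' ∨ a = '4' ∨ a = '5' ∨ a = '6' := by
  have h1' : ('1').toNat ≤ a.toNat := Fin.mk_le_mk.mp h1
  have h2' : a.toNat ≤ ('6').toNat := Fin.mk_le_mk.mp h2
  have hcases : a.toNat = 49 ∨ a.toNat = 50 ∨ a.toNat = 51 ∨ a.toNat = 52 ∨
      a.toNat = 53 ∨ a.toNat = 54 := by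
    have e1 : ('1').toNat = 49 := rfl
    have e6 : ('6').toNat = 54 := rfl
    omega
  have hext : ∀ b : Char, a.toNat = b.toNat → a = b :=
    fun b h => Char.ext (UInt32.toNat_inj.mp h)
  rcases hcases with h | h | h | h | h | h
  · exact Or.inl (hext '1' h)
  · exact Or.inr (Or.inl (hext '2' h))
  · exact Or.inr (Or.inr (Or.inl (hext '3' h)))
  · exact Or.inr (Or.inr (Or.inr (Or.inl (hext '4' h))))
  · exact Or.inr (Or.inr (Or.inr (Or.inr (Or.inl (hext '5' h)))))
  · exact Or.inr (Or.inr (Or.inr (Or.inr (Or.inr (hext '6' h)))))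

theorem pv_join_nil_flatten (l : List (List Char)) :
    PySem.Chars.join [] l = l.flatten := by
  induction l with
  | nil => rfl
  | cons x xs ih =>
    cases xs with
    | nil => simp [PySem.Chars.join_singleton]
    | cons y ys => simp_all [PySem.Chars.join_cons_cons]

theorem pv_range2 (n : Nat) :
    PySem.List.pyRange 0 (n : Int) 2 =
      (List.range ((n + 1) / 2)).map (fun k => ((2 * k : Nat) : Int)) := by
  rw [PySem.List.pyRange_of_pos _ _ (by omega)]
  rcases Nat.eq_zero_or_pos n with rfl | hn
  · simp
  · have h1 : (0 : Int) < (n : Int) := by exact_mod_cast hn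
    have h2 : (((n : Int) - 0 + 2 - 1) / 2).toNat = (n + 1) / 2 := by omega
    simp only [if_pos h1, h2]
    exact List.map_congr_left (by intro k _; push_cast; ring)

theorem pv_chunks_spec (cs : List Char) :
    (PySem.List.pyRange 0 ((cs.length : Nat) : Int) 2).map
      (fun i => PySem.List.slice cs (some i) (some (i + 2))) = pvChunks cs := by
  rw [pv_range2, List.map_map]
  have hsl : ∀ (ds : List Char) (k : Nat),
      PySem.List.slice ds (some ((2 * k : Nat) : Int)) (some (((2 * k : Nat) : Int) + 2)) =
        (ds.drop (2 * k)).take 2 := by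
    intro ds k
    have : (((2 * k : Nat) : Int) + 2) = (((2 * k : Nat) : Int) + ((2 : Nat) : Int)) := by push_cast; ring
    rw [this, PySem.List.slice_natCast_add]
  induction cs using pvChunks.induct with
  | case2 => simp [pvChunks]
  | case3 a =>
    simp only [pvChunks, List.length_singleton]
    rw [show (1 + 1) / 2 = 1 from rfl, List.range_one, List.map_singleton,
      Function.comp_apply, hsl]
    rfl
  | case1 a b rest ih =>
    have hlen : (a :: b :: rest).length = rest.length + 2 := by simp
    rw [hlen, show (rest.length + 2 + 1) / 2 = (rest.length + 1) / 2 + 1 by omega,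
      List.range_succ_eq_map, List.map_cons, List.map_map]
    show _ :: _ = [a, b] :: pvChunks rest
    congr 1
    · rw [← ih]
      refine List.map_congr_left ?_
      intro k _
      simp only [Function.comp_apply, Nat.succ_eq_add_one]
      rw [hsl, hsl, show 2 * (k + 1) = 2 * k + 1 + 1 by ring,
        List.drop_succ_cons, List.drop_succ_cons]

theorem pv_single (a : Char) :
    (pvPolybiusTable.getD (String.ofList [a]) (String.ofList [a])).toList = [a] := by
  simp [pvPolybiusTable, PySem.Dict.getD, PySem.Dict.get?, beq_iff_eq, ← String.toList_inj]

theorem pv_chunk_decode (a b : Char) :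
    (pvPolybiusTable.getD (String.ofList [a, b]) (String.ofList [a, b])).toList =
      pvDecodePair a b := by
  unfold pvDecodePair
  by_cases ha : '1' ≤ a ∧ a ≤ '6'
  · by_cases hb : '1' ≤ b ∧ b ≤ '6'
    · rcases pv_char_range a ha.1 ha.2 with rfl | rfl | rfl | rfl | rfl | rfl <;>
        rcases pv_char_range b hb.1 hb.2 with rfl | rfl | rfl | rfl | rfl | rfl <;>
        decide
    · have h1 : b ≠ '1' := by rintro rfl; exact hb ⟨by decide, by decide⟩
      have h2 : b ≠ '2' := by rintro rfl; exact hb ⟨by decide, by decide⟩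
      have h3 : b ≠ '3' := by rintro rfl; exact hb ⟨by decide, by decide⟩
      have h4 : b ≠ '4' := by rintro rfl; exact hb ⟨by decide, by decide⟩
      have h5 : b ≠ '5' := by rintro rfl; exact hb ⟨by decide, by decide⟩
      have h6 : b ≠ '6' := by rintro rfl; exact hb ⟨by decide, by decide⟩
      rw [if_neg (by rintro ⟨_, _, hb1, hb2⟩; exact hb ⟨hb1, hb2⟩)]
      simp [pvPolybiusTable, PySem.Dict.getD, PySem.Dict.get?, beq_iff_eq, ← String.toList_inj,
        Ne.symm h1, Ne.symm h2, Ne.symm h3, Ne.symm h4, Ne.symm h5, Ne.symm h6]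
  · have h1 : a ≠ '1' := by rintro rfl; exact ha ⟨by decide, by decide⟩
    have h2 : a ≠ '2' := by rintro rfl; exact ha ⟨by decide, by decide⟩
    have h3 : a ≠ '3' := by rintro rfl; exact ha ⟨by decide, by decide⟩
    have h4 : a ≠ '4' := by rintro rfl; exact ha ⟨by decide, by decide⟩
    have h5 : a ≠ '5' := by rintro rfl; exact ha ⟨by decide, by decide⟩
    have h6 : a ≠ '6' := by rintro rfl; exact ha ⟨by decide, by decide⟩
    rw [if_neg (by rintro ⟨ha1, ha2, _, _⟩; exact ha ⟨ha1, ha2⟩)]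
    simp [pvPolybiusTable, PySem.Dict.getD, PySem.Dict.get?, beq_iff_eq, ← String.toList_inj,
      Ne.symm h1, Ne.symm h2, Ne.symm h3, Ne.symm h4, Ne.symm h5, Ne.symm h6]

-- A's per-chunk lookup equals pvDec
theorem pv_lookup_dec (cs : List Char) :
    List.map String.toList ((pvChunks cs).map (fun p =>
      pvPolybiusTable.getD (String.ofList p) (String.ofList p))) =
      (pvChunks cs).map pvDec := by
  induction cs using pvChunks.induct with
  | case2 => rfl
  | case3 a => simp [pvChunks, pvDec, pv_single]
  | case1 a b rest ih =>
    simp only [pvChunks, List.map_cons, ih, pv_chunk_decode]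
    rfl

theorem pvGo_spec (ds : List Char) (out : List (List Char)) :
    pvGo ds out = out ++ pvRevDecode ds := by
  induction ds using pvRevDecode.induct generalizing out with
  | case1 b a rest ih => simp [pvGo, pvRevDecode, ih]
  | case2 ds h => cases ds with
    | nil => simp [pvGo, pvRevDecode]
    | cons x xs =>
      cases xs with
      | nil => simp [pvGo, pvRevDecode]
      | cons y ys => exact absurd rfl (h x y ys)

theorem pvRevDecode_snoc (xs : List Char) (hx : xs.length % 2 = 0) (b a : Char) :
    pvRevDecode (xs ++ [b, a]) = pvRevDecode xs ++ [pvDecodePair a b] := by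
  induction xs using pvRevDecode.induct with
  | case1 y x rest ih =>
    simp only [List.cons_append, pvRevDecode, List.length_cons] at *
    rw [ih (by omega)]
  | case2 ds h => cases ds with
    | nil => rfl
    | cons x xs =>
      cases xs with
      | nil => simp at hx
      | cons y ys => exact absurd rfl (h x y ys)

theorem pv_even_main (cs : List Char) (h : cs.length % 2 = 0) :
    (pvRevDecode cs.reverse).reverse = (pvChunks cs).map pvDec := by
  induction cs using pvChunks.induct with
  | case2 => rfl
  | case3 a => simp at h
  | case1 a b rest ih =>
    have hr : rest.length % 2 = 0 := by simp [List.length_cons] at h; omega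
    have hrev : (a :: b :: rest).reverse = rest.reverse ++ [b, a] := by simp
    rw [hrev, pvRevDecode_snoc rest.reverse (by simpa using hr) b a]
    simp only [List.reverse_append, List.reverse_cons, List.reverse_nil, ih hr]
    simp [pvChunks, pvDec]

theorem pv_chunks_snoc (ds : List Char) (h : ds.length % 2 = 0) (z : Char) :
    pvChunks (ds ++ [z]) = pvChunks ds ++ [[z]] := by
  induction ds using pvChunks.induct with
  | case2 => rfl
  | case3 a => simp at h
  | case1 a b rest ih =>
    have hr : rest.length % 2 = 0 := by simp [List.length_cons] at h; omega
    simp only [List.cons_append, pvChunks, ih hr]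

-- ===== VERDICT (by name: the statement is the Claim_ definition above) =====
theorem polybius_square_decipher_spec : Claim_equal_polybius_square_decipher := by
  intro text _
  unfold Spec_polybius_square_decipher polybius_square_decipher polybius_square_decipher_alt
  rw [← String.toList_inj]
  simp only [PySem.List.len_eq, PySem.Str.toList_join, List.map_map, String.toList_ofList]
  rw [show ("" : String).toList = [] from rfl, pv_join_nil_flatten]
  rw [← List.map_map, ← List.map_map, pv_chunks_spec, pv_lookup_dec]
  generalize text.toList = cs
  by_cases hpar : cs.length % 2 = 1
  · -- odd length: last char passes through as trailer
    have hne : cs ≠ [] := by intro h; rw [h] at hpar; simp at hpar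
    obtain ⟨ds, z, rfl⟩ : ∃ ds z, cs = ds ++ [z] := by
      rcases List.eq_nil_or_concat cs with h | ⟨ds, z, h⟩
      · exact absurd h hne
      · exact ⟨ds, z, by simpa using h⟩
    have hds : ds.length % 2 = 0 := by simp [List.length_append] at hpar ⊢; omega
    have hrev : (ds ++ [z]).reverse = z :: ds.reverse := by simp
    simp only [hrev] at *
    simp only [List.length_cons, List.length_reverse]
    rw [if_pos (by simp [Nat.add_mod]; omega)]
    simp only [List.tail_cons, List.take_succ_cons, List.take_zero]
    rw [pvGo_spec, List.nil_append, pv_even_main ds hds,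
      pv_chunks_snoc ds hds z]
    simp [pvDec]
  · -- even length
    have hpar0 : cs.length % 2 = 0 := by omega
    simp only [List.length_reverse]
    rw [if_neg (by simp [hpar0])]
    rw [pvGo_spec, List.nil_append, pv_even_main cs hpar0]
    simp
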